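-- pv_equiv track=rewrite | github.com/miliar/Code_Jam_Webscraper | solutions_python/Problem_181/1197.py | revenge_of_the_pancakes
-- ===== SOURCE A (Python) =====
-- def revenge_of_the_pancakes(pancakes):
--     '''
--     Code Jam 2016, Qualification Round, Problem B
--     '''
--     last_pancake = '+'
--     n_maneuver = 0
--     for pancake in reversed(pancakes):
--         if pancake == last_pancake:
--             pass
--         else:
--             n_maneuver += 1
--             last_pancake = pancake
--     return n_maneuver
-- ===== SOURCE B (Python) =====
-- def revenge_of_the_pancakes(pancakes):
--     # Stage 1: group the stack into maximal runs, collecting one symbol per run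
--     # (a manual groupby: the inner loop skips a whole run at a time).
--     runs = []
--     i, n = 0, len(pancakes)
--     while i < n:
--         c = pancakes[i]
--         j = i
--         while j < n and pancakes[j] == c:
--             j += 1
--         runs.append(c)
--         i = j
--     # Stage 2: closed formula over the run structure.
--     if not runs:
--         return 0
--     return len(runs) - 1 + (runs[-1] != '+')
-- ===== Notes on version B (the rewrite author's own statement) =====
-- stated objective: alternative
-- what changed: A does one reversed pass with mutable last-pancake/counter state; B first groups the stack into maximal runs (a manual groupby whose inner loop skips a whole run at a time), then computes the answer by the closed formula len(runs)-1+(runs[-1] != '+').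
import Mathlib
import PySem

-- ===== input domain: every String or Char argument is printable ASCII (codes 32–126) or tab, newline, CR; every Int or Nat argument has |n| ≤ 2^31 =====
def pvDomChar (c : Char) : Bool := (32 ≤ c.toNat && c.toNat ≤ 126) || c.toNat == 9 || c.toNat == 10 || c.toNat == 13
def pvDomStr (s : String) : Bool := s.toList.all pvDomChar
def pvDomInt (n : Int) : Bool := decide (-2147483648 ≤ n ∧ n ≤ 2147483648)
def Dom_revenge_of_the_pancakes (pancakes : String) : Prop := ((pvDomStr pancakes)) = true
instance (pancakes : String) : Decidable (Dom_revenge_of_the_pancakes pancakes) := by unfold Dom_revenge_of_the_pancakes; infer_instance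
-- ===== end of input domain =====

-- B replaces A's reversed stateful scan by a two-stage run decomposition: group
-- the stack into maximal runs, then a closed formula over the run list (objective: alternative).

-- ===== PORT A =====
-- A: scan reversed(pancakes) keeping (last_pancake, n_maneuver); bump on change.
def revenge_of_the_pancakes (pancakes : String) : Int :=
  (pancakes.toList.reverse.foldl
    (fun (st : Char × Int) pancake =>
      if pancake == st.1 then st else (pancake, st.2 + 1))
    ('+', 0)).2

-- ===== PORT B =====
-- B stage 1: collect one symbol per maximal run; the recursive call receives the
-- input with the whole current run skipped (Source B's inner while loop).
def pvRuns : List Char → List Char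
  | [] => []
  | c :: rest => c :: pvRuns (rest.dropWhile (fun x => x == c))
termination_by l => l.length
decreasing_by
  exact Nat.lt_succ_of_le (List.length_dropWhile_le _ _)

-- B stage 2: closed formula over the run list.
def revenge_of_the_pancakes_alt (pancakes : String) : Int :=
  match pvRuns pancakes.toList with
  | [] => 0
  | c :: cs =>
    ((c :: cs).length : Int) - 1 + (if (c :: cs).getLastD c ≠ '+' then 1 else 0)

-- ===== PRECONDITION & SPEC =====
def Spec_revenge_of_the_pancakes (pancakes : String) (out : Int) : Prop := out = revenge_of_the_pancakes_alt pancakes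
instance (pancakes : String) (out : Int) : Decidable (Spec_revenge_of_the_pancakes pancakes out) := by unfold Spec_revenge_of_the_pancakes; infer_instance

-- ===== CLAIM (what is proved, stated in full; the proofs are below) =====
def Claim_equal_revenge_of_the_pancakes : Prop := ∀ (pancakes : String), Dom_revenge_of_the_pancakes pancakes → Spec_revenge_of_the_pancakes pancakes (revenge_of_the_pancakes pancakes)

-- ===== LEMMAS AND PROOFS =====

-- pvAux c l = number of adjacent differing pairs in the sequence c :: l.
def pvAux (c : Char) : List Char → Int
  | [] => 0
  | x :: xs => (if x = c then 0 else 1) + pvAux x xs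

theorem pvGetLastD_cons (x c : Char) (xs : List Char) :
    (x :: xs).getLastD c = xs.getLastD x := by
  cases xs <;> simp [List.getLastD]

theorem pvGetLastDConcat (xs : List Char) : ∀ (x c : Char), (xs ++ [x]).getLastD c = x := by
  induction xs with
  | nil => intro x c; simp [List.getLastD]
  | cons a xs ih =>
    intro x c
    rw [List.cons_append, pvGetLastD_cons, ih]

theorem pvFoldA (xs : List Char) : ∀ (c : Char) (n : Int),
    (xs.foldl (fun (st : Char × Int) p => if p == st.1 then st else (p, st.2 + 1)) (c, n)).2
      = n + pvAux c xs := by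
  induction xs with
  | nil => intro c n; simp [pvAux]
  | cons x xs ih =>
    intro c n
    have hstep : (if (x == (c, n).1) = true then (c, n) else (x, (c, n).2 + 1))
        = if x = c then (c, n) else (x, n + 1) := by
      by_cases h : x = c <;> simp [h]
    rw [List.foldl_cons, hstep]
    by_cases h : x = c
    · rw [if_pos h, ih, pvAux]
      simp [h]
    · rw [if_neg h, ih, pvAux]
      simp only [h, if_false]
      ring

theorem pvAuxConcat (xs : List Char) : ∀ (c y : Char),
    pvAux c (xs ++ [y]) = pvAux c xs + (if xs.getLastD c = y then 0 else 1) := by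
  induction xs with
  | nil => intro c y; simp [pvAux, List.getLastD, eq_comm]
  | cons x xs ih =>
    intro c y
    rw [List.cons_append, pvAux, pvAux, ih x y, pvGetLastD_cons]
    ring

theorem pvAuxReverse (t : List Char) : ∀ (h c : Char),
    pvAux c (h :: t).reverse
      = pvAux h t + (if (h :: t).getLastD h = c then 0 else 1) := by
  induction t with
  | nil => intro h c; simp [pvAux, List.getLastD]
  | cons x xs ih =>
    intro h c
    have hrev : (h :: x :: xs).reverse = (x :: xs).reverse ++ [h] := by simp
    have hlast : (x :: xs).reverse.getLastD c = x := by
      rw [List.reverse_cons, pvGetLastDConcat]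
    rw [hrev, pvAuxConcat, ih x c, hlast, pvGetLastD_cons, pvGetLastD_cons, pvGetLastD_cons, pvAux]
    ring

-- dropping the leading run neither changes the transition count …
theorem pvAuxDrop (t : List Char) : ∀ (h : Char),
    pvAux h (t.dropWhile (fun x => x == h)) = pvAux h t := by
  induction t with
  | nil => intro h; simp
  | cons x xs ih =>
    intro h
    by_cases hx : x = h
    · subst hx
      rw [List.dropWhile_cons_of_pos (by simp), ih, pvAux]
      simp
    · rw [List.dropWhile_cons_of_neg (by simp [hx])]

-- … nor the last symbol (relative to default h).
theorem pvLastDrop (t : List Char) : ∀ (h : Char),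
    (t.dropWhile (fun x => x == h)).getLastD h = t.getLastD h := by
  induction t with
  | nil => intro h; simp
  | cons x xs ih =>
    intro h
    by_cases hx : x = h
    · subst hx
      rw [List.dropWhile_cons_of_pos (by simp), ih, pvGetLastD_cons]
    · rw [List.dropWhile_cons_of_neg (by simp [hx])]

-- the number of runs is the transition count plus one
theorem pvRunsLengthAux : ∀ (n : Nat) (h : Char) (t : List Char), t.length ≤ n →
    ((pvRuns (h :: t)).length : Int) = 1 + pvAux h t := by
  intro n
  induction n with
  | zero =>
    intro h t ht
    have : t = [] := List.length_eq_zero_iff.mp (Nat.le_zero.mp ht)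
    subst this
    simp [pvRuns, pvAux]
  | succ n ih =>
    intro h t ht
    rw [pvRuns]
    rcases hd : t.dropWhile (fun x => x == h) with _ | ⟨x, xs⟩
    · have : pvAux h t = 0 := by rw [← pvAuxDrop, hd]; rfl
      simp [pvRuns, this]
    · have hsub : x :: xs <:+ t := hd ▸ List.dropWhile_suffix _
      have hlen : (x :: xs).length < (h :: t).length :=
        Nat.lt_succ_of_le (List.IsSuffix.length_le hsub)
      have hxs : xs.length ≤ n := by
        have := List.IsSuffix.length_le hsub
        simp at this; omega
      have hih := ih x xs hxs
      have hx : ¬ x = h := by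
        have := hd ▸ List.head?_dropWhile_not (fun y => y == h) t
        simpa using this
      have haux : pvAux h t = 1 + pvAux x xs := by
        rw [← pvAuxDrop, hd, pvAux]
        simp [hx]
      rw [List.length_cons, haux]
      push_cast
      rw [hih]
      ring

theorem pvRunsLength (h : Char) (t : List Char) :
    ((pvRuns (h :: t)).length : Int) = 1 + pvAux h t :=
  pvRunsLengthAux t.length h t le_rfl

-- the last run symbol is the last pancake
theorem pvRunsLastAux : ∀ (n : Nat) (h : Char) (t : List Char) (d : Char), t.length ≤ n →
    (pvRuns (h :: t)).getLastD d = (h :: t).getLastD d := by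
  intro n
  induction n with
  | zero =>
    intro h t d ht
    have : t = [] := List.length_eq_zero_iff.mp (Nat.le_zero.mp ht)
    subst this
    simp [pvRuns]
  | succ n ih =>
    intro h t d ht
    rw [pvRuns, pvGetLastD_cons, pvGetLastD_cons]
    rcases hd : t.dropWhile (fun x => x == h) with _ | ⟨x, xs⟩
    · have hlg : t.getLastD h = h := by rw [← pvLastDrop, hd]; rfl
      have h0 : pvRuns ([] : List Char) = [] := by rw [pvRuns]
      rw [h0, hlg]
      simp [List.getLastD]
    · have hsub : x :: xs <:+ t := hd ▸ List.dropWhile_suffix _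
      have hxs : xs.length ≤ n := by
        have := List.IsSuffix.length_le hsub
        simp at this; omega
      rw [ih x xs h hxs, ← hd, pvLastDrop]

theorem pvRunsLast (h : Char) (t : List Char) (d : Char) :
    (pvRuns (h :: t)).getLastD d = (h :: t).getLastD d :=
  pvRunsLastAux t.length h t d le_rfl

-- ===== VERDICT (by name: the statement is the Claim_ definition above) =====
theorem revenge_of_the_pancakes_spec : Claim_equal_revenge_of_the_pancakes := by
  intro pancakes _
  unfold Spec_revenge_of_the_pancakes revenge_of_the_pancakes revenge_of_the_pancakes_alt
  rcases hl : pancakes.toList with _ | ⟨h, t⟩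
  · simp [pvRuns]
  · rw [pvFoldA]
    rcases hr : pvRuns (h :: t) with _ | ⟨c, cs⟩
    · exact absurd hr (by rw [pvRuns]; simp)
    · have hlen : ((c :: cs).length : Int) = 1 + pvAux h t := by
        rw [← hr]; exact pvRunsLength h t
      have hlast : (c :: cs).getLastD c = (h :: t).getLastD h := by
        rw [← hr]; exact pvRunsLast h t c
      rw [pvAuxReverse t h '+']
      show (0 : Int) + (pvAux h t + if (h :: t).getLastD h = '+' then 0 else 1)
          = ((c :: cs).length : Int) - 1 + (if (c :: cs).getLastD c ≠ '+' then 1 else 0)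
      rw [hlen, hlast, zero_add]
      by_cases hp : (h :: t).getLastD h = '+'
      · rw [if_pos hp, if_neg (not_not_intro hp)]
        ring
      · simp only [hp, ne_eq, not_false_eq_true, if_true, if_false]
        ring
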